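-- pv_equiv track=rewrite | github.com/Mark-Mekhail/Meta-Careers-Coding-Puzzle-Solutions | Level 3/Slippery Trip/python/Slippery_Trip.py | getMaxCollectableCoins
-- ===== SOURCE A (Python) =====
-- from typing import List
--
-- def getMaxCollectableCoins(R: int, C: int, G: List[List[str]]) -> int:
--     maxEndingRowCoinCount = 0  # The maximum number of coins you can collect if your trip ends on a given row (by lasting forever on that row)
--     runningCoinCount = 0  # The maximum number of coins that you can collect without ending on a row
--     for row in G:
--         if "v" in row:
--             rowMaxCollectableCoinCount = 1 if "*" in row else 0
--
--             # Find the maximum number of coins that can be collected in a row before leaving it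
--             start = row.index("v") - 1  # Start from the cell before a "v" and move left
--             curCoinCount = 0
--             for j in range(C):
--                 index = (C + start - j) % C
--                 cur = row[index]
--
--                 if cur == "*":
--                     curCoinCount += 1
--                 elif cur == ">":
--                     # If you enter a ">" cell on a row, you will end on the row and collect all coins between the ">" and the last "v" cell
--                     rowMaxCollectableCoinCount = max(rowMaxCollectableCoinCount, curCoinCount)
--                 elif cur == "v":
--                     # A "v" cell will move you on to the next row so no uncollected coins to the right of it will be collected
--                     curCoinCount = 0
--
--             runningCoinCount += rowMaxCollectableCoinCount
--         else:
--             if ">" in row: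
--                 # If there is no "v" in the row and you enter it on a ">" you will end on the row and collect all coins on it
--                 maxEndingRowCoinCount = max(runningCoinCount + row.count("*"), maxEndingRowCoinCount)
--
--             if "*" in row:
--                 # You can always collect a coin from a row as long as there is a coin in it
--                 runningCoinCount += 1
--             elif "." not in row:
--                 # The row only has ">" cells so you cannot proceed further down
--                 break
--
--     return max(maxEndingRowCoinCount, runningCoinCount)
-- ===== SOURCE B (Python) =====
-- from typing import List
--
-- def _rowGain(row: List[str], C: int) -> int:
--     # Coins gainable from a row containing a "v": rotate the first C cells so the
--     # rotation starts at the first "v", cut it into "v"-delimited segments, and for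
--     # each segment count the '*' after its leftmost ">"; baseline 1 if any '*'.
--     best = 1 if "*" in row else 0
--     p0 = row.index("v") % C
--     rot = row[p0:C] + row[:p0]
--     segs = []
--     cur = []
--     for cell in rot:
--         if cell == "v":
--             segs.append(cur)
--             cur = []
--         else:
--             cur.append(cell)
--     segs.append(cur)
--     for seg in segs:
--         if ">" in seg:
--             best = max(best, seg[seg.index(">") + 1:].count("*"))
--     return best
--
-- def getMaxCollectableCoins(R: int, C: int, G: List[List[str]]) -> int:
--     best_ending = 0
--     running = 0
--     for row in G:
--         if "v" in row:
--             running += _rowGain(row, C)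
--         else:
--             if ">" in row:
--                 best_ending = max(best_ending, running + row.count("*"))
--             if "*" in row:
--                 running += 1
--             elif "." not in row:
--                 break
--     return max(best_ending, running)
-- ===== Notes on version B (the rewrite author's own statement) =====
-- stated objective: alternative
-- what changed: The inner wraparound scan with modular index arithmetic is replaced by rotating the first C cells to start at the first 'v', splitting the circular row into 'v'-delimited segments, and taking per segment the count of '*' after its leftmost '>'.
-- outside the precondition, e.g. on getMaxCollectableCoins(1, 0, [['v']]): A returns 0, B raises ZeroDivisionError; on getMaxCollectableCoins(1, -1, [['>', '*', '*', 'v']]): A returns 1, B returns 2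
import Mathlib
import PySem

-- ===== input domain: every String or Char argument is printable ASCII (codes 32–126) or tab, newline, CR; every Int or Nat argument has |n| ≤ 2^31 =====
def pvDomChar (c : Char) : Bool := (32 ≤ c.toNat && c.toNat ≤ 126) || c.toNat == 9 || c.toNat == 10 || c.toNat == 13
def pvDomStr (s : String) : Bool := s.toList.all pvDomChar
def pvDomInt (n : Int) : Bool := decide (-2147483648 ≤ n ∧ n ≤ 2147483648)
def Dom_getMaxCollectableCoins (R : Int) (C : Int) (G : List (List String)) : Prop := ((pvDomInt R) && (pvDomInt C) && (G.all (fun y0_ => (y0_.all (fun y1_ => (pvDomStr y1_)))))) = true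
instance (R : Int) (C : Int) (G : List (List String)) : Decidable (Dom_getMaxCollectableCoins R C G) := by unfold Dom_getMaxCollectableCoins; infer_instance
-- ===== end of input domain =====

-- B replaces A's modular wraparound sweep over each "v"-row by a rotate-then-split-into-
-- "v"-delimited-segments computation (alternative decomposition, same asymptotic cost).

-- ===== PORT A =====
def pvAloop (C : Int) : List (List String) → Int → Int → Int
  | [], me, run => max me run
  | row :: rest, me, run =>
    if "v" ∈ row then
      let base : Int := if "*" ∈ row then 1 else 0
      let start : Int := (((PySem.List.index? row "v").getD 0 : Nat) : Int) - 1
      let st := (PySem.List.pyRange 0 C 1).foldl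
        (fun (st : Int × Int) j =>
          let index := PySem.Int.mod (C + start - j) C
          let cur := (PySem.List.pyGet? row index).getD ""
          if cur = "*" then (st.1, st.2 + 1)
          else if cur = ">" then (max st.1 st.2, st.2)
          else if cur = "v" then (st.1, 0)
          else st)
        (base, 0)
      pvAloop C rest me (run + st.1)
    else
      let me' := if ">" ∈ row then max (run + (PySem.List.count row "*" : Int)) me else me
      if "*" ∈ row then pvAloop C rest me' (run + 1)
      else if "." ∈ row then pvAloop C rest me' run
      else max me' run

def getMaxCollectableCoins (R : Int) (C : Int) (G : List (List String)) : Int :=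
  pvAloop C G 0 0

-- ===== PORT B =====
def pvRowGain (row : List String) (C : Int) : Int :=
  let best : Int := if "*" ∈ row then 1 else 0
  let p0 : Int := PySem.Int.mod (((PySem.List.index? row "v").getD 0 : Nat) : Int) C
  let rot := PySem.List.slice row (some p0) (some C) ++ PySem.List.slice row none (some p0)
  let sc := rot.foldl
    (fun (sc : List (List String) × List String) cell =>
      if cell = "v" then (sc.1 ++ [sc.2], ([] : List String))
      else (sc.1, sc.2 ++ [cell]))
    ([], [])
  let segs := sc.1 ++ [sc.2]
  segs.foldl
    (fun best seg =>
      if ">" ∈ seg then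
        max best (PySem.List.count
          (PySem.List.slice seg (some ((((PySem.List.index? seg ">").getD 0 : Nat) : Int) + 1)) none) "*" : Int)
      else best)
    best

def pvBloop (C : Int) : List (List String) → Int → Int → Int
  | [], be, run => max be run
  | row :: rest, be, run =>
    if "v" ∈ row then pvBloop C rest be (run + pvRowGain row C)
    else
      let be' := if ">" ∈ row then max be (run + (PySem.List.count row "*" : Int)) else be
      if "*" ∈ row then pvBloop C rest be' (run + 1)
      else if "." ∈ row then pvBloop C rest be' run
      else max be' run

def getMaxCollectableCoins_alt (R : Int) (C : Int) (G : List (List String)) : Int :=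
  pvBloop C G 0 0

-- ===== PRECONDITION & SPEC =====
-- rows A actually visits before its break: the prefix of rows that have a "v", a "*" or a "."
def pvBreakFree (row : List String) : Bool :=
  decide ("v" ∈ row) || decide ("*" ∈ row) || decide ("." ∈ row)

-- Pre_ excludes inputs where A raises IndexError (a visited "v"-row shorter than C) and, as a
-- stated narrowing to the natural domain of positive column counts, visited "v"-rows with C ≤ 0,
-- where A's inner loop is vacuously empty while B's modulus/slicing assumes 0 < C.
def Pre_getMaxCollectableCoins (R : Int) (C : Int) (G : List (List String)) : Prop :=
  ∀ row ∈ G.takeWhile pvBreakFree, "v" ∈ row → 0 < C ∧ C ≤ (row.length : Int)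

instance (R : Int) (C : Int) (G : List (List String)) : Decidable (Pre_getMaxCollectableCoins R C G) := by
  unfold Pre_getMaxCollectableCoins; infer_instance

def pvWitness_getMaxCollectableCoins : Int × Int × List (List String) :=
  (2, 2, [["v", "*"], [">", "."]])

def Spec_getMaxCollectableCoins (R : Int) (C : Int) (G : List (List String)) (out : Int) : Prop := out = getMaxCollectableCoins_alt R C G
instance (R : Int) (C : Int) (G : List (List String)) (out : Int) : Decidable (Spec_getMaxCollectableCoins R C G out) := by unfold Spec_getMaxCollectableCoins; infer_instance

-- ===== CLAIM (what is proved, stated in full; the proofs are below) =====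
def Claim_equal_getMaxCollectableCoins : Prop := ∀ (R : Int) (C : Int) (G : List (List String)), Dom_getMaxCollectableCoins R C G → Pre_getMaxCollectableCoins R C G → Spec_getMaxCollectableCoins R C G (getMaxCollectableCoins R C G)

-- ===== LEMMAS AND PROOFS =====

-- the inner-loop body of A as a step function on (rowMax, curCoinCount)
def pvF (st : Int × Int) (cur : String) : Int × Int :=
  if cur = "*" then (st.1, st.2 + 1)
  else if cur = ">" then (max st.1 st.2, st.2)
  else if cur = "v" then (st.1, 0)
  else st

-- "v"-delimited segments of a list (structural recursion; always nonempty)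
def pvSegs : List String → List (List String)
  | [] => [[]]
  | c :: t =>
    if c = "v" then [] :: pvSegs t
    else
      match pvSegs t with
      | [] => [[c]]
      | s :: r => (c :: s) :: r

-- value of a segment: '*'-count after its leftmost ">" (Source B's expression)
def pvVal (seg : List String) : Int :=
  (PySem.List.count
    (PySem.List.slice seg (some ((((PySem.List.index? seg ">").getD 0 : Nat) : Int) + 1)) none) "*" : Int)

def pvStep (m : Int) (seg : List String) : Int :=
  if ">" ∈ seg then max m (pvVal seg) else m

theorem pvF_star (st : Int × Int) : pvF st "*" = (st.1, st.2 + 1) := by simp [pvF]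

theorem pvF_gt (st : Int × Int) : pvF st ">" = (max st.1 st.2, st.2) := by
  unfold pvF; rw [if_neg (by decide), if_pos rfl]

theorem pvF_v (st : Int × Int) : pvF st "v" = (st.1, 0) := by
  unfold pvF; rw [if_neg (by decide), if_neg (by decide), if_pos rfl]

theorem pvF_other (st : Int × Int) (c : String) (h1 : c ≠ "*") (h2 : c ≠ ">") (h3 : c ≠ "v") :
    pvF st c = st := by
  unfold pvF; rw [if_neg h1, if_neg h2, if_neg h3]

theorem pvSegs_ne_nil (l : List String) : pvSegs l ≠ [] := by
  cases l with
  | nil => simp [pvSegs]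
  | cons c t =>
    simp only [pvSegs]
    split
    · simp
    · split <;> simp

theorem pvVal_le (s : List String) : pvVal s ≤ (s.count "*" : Int) := by
  unfold pvVal
  rw [PySem.List.count_eq, PySem.List.slice_from _ (by positivity)]
  exact_mod_cast (List.drop_sublist _ s).count_le "*" 

theorem pvVal_cons (c : String) (s : List String) (hc : c ≠ ">") (h : ">" ∈ s) :
    pvVal (c :: s) = pvVal s := by
  obtain ⟨i, hi⟩ := Option.isSome_iff_exists.mp ((PySem.List.index?_isSome_iff s ">").mpr h)
  unfold pvVal
  rw [PySem.List.index?_cons_of_ne s hc, hi]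
  have h1 : ((((Option.some i).map (· + 1)).getD 0 : Nat) : Int) + 1 = ((i + 2 : Nat) : Int) := by
    simp only [Option.map_some, Option.getD_some]; push_cast; ring
  have h2 : (((Option.some i).getD 0 : Nat) : Int) + 1 = ((i + 1 : Nat) : Int) := by
    simp only [Option.getD_some]; push_cast; ring
  rw [h1, h2, PySem.List.slice_from_natCast, PySem.List.slice_from_natCast]
  have : (c :: s).drop (i + 2) = s.drop (i + 1) := by
    simp [List.drop_succ_cons]
  rw [this]

theorem pvVal_gt_cons (s : List String) : pvVal (">" :: s) = (s.count "*" : Int) := by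
  unfold pvVal
  rw [PySem.List.index?_cons_self]
  have h1 : (((Option.some (0:Nat)).getD 0 : Nat) : Int) + 1 = ((1 : Nat) : Int) := by simp
  rw [h1, PySem.List.slice_from_natCast]
  simp [PySem.List.count_eq]

theorem pvStep_cons (m : Int) (c : String) (s : List String) (hc : c ≠ ">") :
    pvStep m (c :: s) = pvStep m s := by
  unfold pvStep
  by_cases h : ">" ∈ s
  · rw [if_pos (List.mem_cons_of_mem c h), if_pos h, pvVal_cons c s hc h]
  · rw [if_neg (by simp [List.mem_cons, h]; exact fun e => hc e.symm), if_neg h]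

theorem pvStep_max_shift (ss : List (List String)) (a b : Int) :
    ss.foldl pvStep (max a b) = max (ss.foldl pvStep a) b := by
  induction ss generalizing a with
  | nil => rfl
  | cons s ss ih =>
    simp only [List.foldl_cons]
    have : pvStep (max a b) s = max (pvStep a s) b := by
      unfold pvStep; split
      · omega
      · rfl
    rw [this, ih]

-- the builder loop of Source B produces exactly pvSegs
theorem pvBuild (l : List String) : ∀ (segs : List (List String)) (cur : List String),
    (l.foldl (fun (sc : List (List String) × List String) cell =>
      if cell = "v" then (sc.1 ++ [sc.2], ([] : List String))
      else (sc.1, sc.2 ++ [cell])) (segs, cur)).1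
    ++ [(l.foldl (fun (sc : List (List String) × List String) cell =>
      if cell = "v" then (sc.1 ++ [sc.2], ([] : List String))
      else (sc.1, sc.2 ++ [cell])) (segs, cur)).2]
    = segs ++ (match pvSegs l with
               | [] => [cur]
               | s :: r => (cur ++ s) :: r) := by
  induction l with
  | nil => intro segs cur; simp [pvSegs]
  | cons c t ih =>
    intro segs cur
    obtain ⟨s, r, hsr⟩ := List.exists_cons_of_ne_nil (pvSegs_ne_nil t)
    by_cases hc : c = "v"
    · subst hc
      simp only [List.foldl_cons, reduceIte]
      rw [ih (segs ++ [cur]) []]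
      simp [pvSegs, hsr, List.append_assoc]
    · simp only [List.foldl_cons, if_neg hc]
      rw [ih segs (cur ++ [c])]
      have h1 : pvSegs (c :: t) = (c :: s) :: r := by
        simp [pvSegs, hc, hsr]
      rw [h1, hsr]
      simp [List.append_assoc]

-- the right-to-left scan equals the segment fold
theorem pvScan_eq (l : List String) (m0 : Int) :
    l.foldr (fun x y => pvF y x) (m0, 0)
      = ((pvSegs l).foldl pvStep m0, ((pvSegs l).headI.count "*" : Int)) := by
  induction l generalizing m0 with
  | nil => simp [pvSegs, pvStep]
  | cons c t ih =>
    obtain ⟨s, r, hsr⟩ := List.exists_cons_of_ne_nil (pvSegs_ne_nil t)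
    rw [List.foldr_cons, ih]
    by_cases hv : c = "v"
    · subst hv
      have h1 : pvSegs ("v" :: t) = [] :: pvSegs t := by simp [pvSegs]
      have h2 : pvStep m0 [] = m0 := by simp [pvStep]
      rw [h1, pvF_v]
      simp only [List.foldl_cons, List.headI]
      rw [h2]
      simp [hsr]
    · by_cases hs : c = "*"
      · subst hs
        have h1 : pvSegs ("*" :: t) = ("*" :: s) :: r := by simp [pvSegs, hsr]
        have h2 : pvStep m0 ("*" :: s) = pvStep m0 s := pvStep_cons m0 "*" s (by decide)
        rw [h1, hsr, pvF_star]
        simp only [List.foldl_cons, List.headI]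
        rw [h2]
        refine Prod.ext rfl ?_
        simp
      · by_cases hgt : c = ">"
        · subst hgt
          have h1 : pvSegs (">" :: t) = (">" :: s) :: r := by simp [pvSegs, hsr]
          have hstep : pvStep m0 (">" :: s) = max m0 ((s.count "*" : Int)) := by
            simp [pvStep, pvVal_gt_cons]
          rw [h1, hsr, pvF_gt]
          simp only [List.foldl_cons, List.headI]
          rw [hstep, pvStep_max_shift]
          refine Prod.ext ?_ ?_
          · simp only []
            by_cases hin : ">" ∈ s
            · have h3 : pvStep m0 s = max m0 (pvVal s) := by simp [pvStep, hin]
              rw [h3, pvStep_max_shift]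
              have := pvVal_le s
              omega
            · have h3 : pvStep m0 s = m0 := by simp [pvStep, hin]
              rw [h3]
          · simp
        · have h1 : pvSegs (c :: t) = (c :: s) :: r := by simp [pvSegs, hv, hsr]
          have h2 : pvStep m0 (c :: s) = pvStep m0 s := pvStep_cons m0 c s hgt
          rw [h1, hsr, pvF_other _ c hs hgt hv]
          simp only [List.foldl_cons, List.headI]
          rw [h2]
          refine Prod.ext rfl ?_
          have hcc : List.count "*" (c :: s) = List.count "*" s := by
            simp [hs]
          simp [hcc]

-- the sequence of cells A reads is the reversed rotation B builds
theorem pvReads_eq (row : List String) (C I : Int) (hC : 0 < C)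
    (hlen : C ≤ (row.length : Int)) :
    (PySem.List.pyRange 0 C 1).map
        (fun j => (PySem.List.pyGet? row (PySem.Int.mod (C + (I - 1) - j) C)).getD "")
      = (PySem.List.slice row (some (PySem.Int.mod I C)) (some C)
          ++ PySem.List.slice row none (some (PySem.Int.mod I C))).reverse := by
  have hp0nn : (0:Int) ≤ I % C := Int.emod_nonneg I (by omega)
  have hp0lt : I % C < C := Int.emod_lt_of_pos I hC
  have hCtle : C.toNat ≤ row.length := by omega
  have hrhs : PySem.List.slice row (some (PySem.Int.mod I C)) (some C)
      ++ PySem.List.slice row none (some (PySem.Int.mod I C))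
      = (row.take C.toNat).rotate (I % C).toNat := by
    rw [PySem.Int.mod_eq_emod_of_pos hC, PySem.List.slice_toNat row hp0nn hC.le,
      PySem.List.slice_to row hp0nn]
    rw [List.rotate_eq_drop_append_take]
    · rw [List.drop_take]
      congr 1
      rw [List.take_take]
      congr 1
      omega
    · rw [List.length_take]; omega
  rw [hrhs]
  have hdiv : C * (I / C) + I % C = I := (Int.mul_ediv_add_emod I C : C * (I / C) + I % C = I)
  generalize hgen : I % C = p0 at hp0nn hp0lt hdiv ⊢
  apply List.ext_getElem
  · simp only [List.length_map, PySem.List.length_pyRange_one, List.length_reverse,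
      List.length_rotate, List.length_take]
    omega
  · intro i h1 h2
    have hiC : i < C.toNat := by
      simpa [PySem.List.length_pyRange_one] using h1
    simp only [List.getElem_map, PySem.List.getElem_pyRange_one]
    rw [PySem.Int.mod_eq_emod_of_pos hC]
    set m : Int := (C + (I - 1) - (0 + (i:Int))) % C with hm
    have hmnn : 0 ≤ m := Int.emod_nonneg _ (by omega)
    have hmlt : m < C := Int.emod_lt_of_pos _ hC
    rw [PySem.List.pyGet?_eq_some_getElem row hmnn (by omega), Option.getD_some]
    rw [List.getElem_reverse, List.getElem_rotate]
    have hsplit : C + (I - 1) - (0 + (i:Int)) = (C - 1 - i + p0) + C * (I / C) := by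
      linarith
    have hmval : m = (C - 1 - i + p0) % C := by
      rw [hm, hsplit, Int.add_mul_emod_self_left]
    have hcast : (((C.toNat - 1 - i + p0.toNat) % C.toNat : Nat) : Int)
        = (C - 1 - i + p0) % C := by
      rw [Int.natCast_mod]
      congr 1 <;> omega
    have hfin : m.toNat = (C.toNat - 1 - i + p0.toNat) % C.toNat := by
      rw [hmval.trans hcast.symm, Int.toNat_natCast]
    simp only [List.length_rotate, List.length_take, min_eq_left hCtle, List.getElem_take]
    congr 1

theorem pvInner_eq (row : List String) (C : Int) (hC : 0 < C)
    (hlen : C ≤ (row.length : Int)) :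
    ((PySem.List.pyRange 0 C 1).foldl
        (fun (st : Int × Int) j =>
          let index := PySem.Int.mod (C + ((((PySem.List.index? row "v").getD 0 : Nat) : Int) - 1) - j) C
          let cur := (PySem.List.pyGet? row index).getD ""
          if cur = "*" then (st.1, st.2 + 1)
          else if cur = ">" then (max st.1 st.2, st.2)
          else if cur = "v" then (st.1, 0)
          else st)
        ((if "*" ∈ row then (1 : Int) else 0), 0)).1
      = pvRowGain row C := by
  set I : Int := (((PySem.List.index? row "v").getD 0 : Nat) : Int) with hIdef
  show ((PySem.List.pyRange 0 C 1).foldl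
      (fun (st : Int × Int) j =>
        pvF st ((PySem.List.pyGet? row (PySem.Int.mod (C + (I - 1) - j) C)).getD ""))
      ((if "*" ∈ row then (1 : Int) else 0), 0)).1 = pvRowGain row C
  rw [show (PySem.List.pyRange 0 C 1).foldl
      (fun (st : Int × Int) j =>
        pvF st ((PySem.List.pyGet? row (PySem.Int.mod (C + (I - 1) - j) C)).getD ""))
      ((if "*" ∈ row then (1 : Int) else 0), 0)
    = ((PySem.List.pyRange 0 C 1).map
        (fun j => (PySem.List.pyGet? row (PySem.Int.mod (C + (I - 1) - j) C)).getD "")).foldl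
        pvF ((if "*" ∈ row then (1 : Int) else 0), 0) from (List.foldl_map).symm]
  rw [pvReads_eq row C I hC hlen, List.foldl_reverse, pvScan_eq]
  obtain ⟨s, r, hsr⟩ := List.exists_cons_of_ne_nil (pvSegs_ne_nil
    (PySem.List.slice row (some (PySem.Int.mod I C)) (some C)
      ++ PySem.List.slice row none (some (PySem.Int.mod I C))))
  have hbuild := pvBuild (PySem.List.slice row (some (PySem.Int.mod I C)) (some C)
      ++ PySem.List.slice row none (some (PySem.Int.mod I C))) [] []
  rw [hsr] at hbuild
  simp only [List.nil_append] at hbuild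
  simp only [pvRowGain, ← hIdef]
  rw [hbuild, hsr]
  rfl

theorem pvLoop_eq (C : Int) (G : List (List String)) : ∀ (me run : Int),
    (∀ row ∈ G.takeWhile pvBreakFree, "v" ∈ row → 0 < C ∧ C ≤ (row.length : Int)) →
    pvAloop C G me run = pvBloop C G me run := by
  induction G with
  | nil => intro me run _; rfl
  | cons row rest ih =>
    intro me run hPre
    have hPre' : pvBreakFree row = true →
        ∀ r' ∈ rest.takeWhile pvBreakFree, "v" ∈ r' → 0 < C ∧ C ≤ (r'.length : Int) := by
      intro hp r' hr' hv'
      exact hPre r' (by rw [List.takeWhile_cons_of_pos hp]; exact List.mem_cons_of_mem _ hr') hv'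
    by_cases hv : "v" ∈ row
    · have hp : pvBreakFree row = true := by simp [pvBreakFree, hv]
      obtain ⟨hC, hlen⟩ := hPre row
        (by rw [List.takeWhile_cons_of_pos hp]; exact List.mem_cons_self) hv
      simp only [pvAloop, pvBloop, if_pos hv]
      rw [pvInner_eq row C hC hlen]
      exact ih _ _ (hPre' hp)
    · simp only [pvAloop, pvBloop, if_neg hv]
      have hme : (if ">" ∈ row then max (run + (PySem.List.count row "*" : Int)) me else me)
          = (if ">" ∈ row then max me (run + (PySem.List.count row "*" : Int)) else me) := by
        split
        · exact max_comm _ _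
        · rfl
      rw [hme]
      by_cases hs : "*" ∈ row
      · have hp : pvBreakFree row = true := by simp [pvBreakFree, hs]
        simp only [if_pos hs]
        exact ih _ _ (hPre' hp)
      · simp only [if_neg hs]
        by_cases hd : "." ∈ row
        · have hp : pvBreakFree row = true := by simp [pvBreakFree, hd]
          simp only [if_pos hd]
          exact ih _ _ (hPre' hp)
        · simp only [if_neg hd]

-- ===== VERDICT (by name: the statement is the Claim_ definition above) =====
theorem getMaxCollectableCoins_spec : Claim_equal_getMaxCollectableCoins := by
  intro R C G _ hPre
  unfold Spec_getMaxCollectableCoins getMaxCollectableCoins getMaxCollectableCoins_alt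
  exact pvLoop_eq C G 0 0 hPre
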